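-- pv_equiv track=rewrite | github.com/ariuk44/retake_exam_prep | day_28.py | is235Array
-- ===== SOURCE A (Python) =====
-- def is235Array(arr):
--     count2 = 0
--     count3 = 0
--     count5 = 0
--     countOther = 0
--     for i in arr:
--         if i % 2 == 0:
--             count2 += 1
--         if i % 3 == 0:
--             count3 += 1
--         if i % 5 == 0:
--             count5 += 1
--         if i % 2 != 0 and i % 3 != 0 and i % 5 != 0:
--             countOther += 1
--     return 1 if (count2 + count3 + count5 + countOther) == len(arr) else 0
-- ===== SOURCE B (Python) =====
-- def is235Array(arr):
--     for i in arr: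
--         if sum(i % d == 0 for d in (2, 3, 5)) >= 2:
--             return 0
--     return 1
-- ===== Notes on version B (the rewrite author's own statement) =====
-- stated objective: simpler
-- what changed: Replaces the four running counters and the final comparison with len(arr) by a single early-exit scan that returns 0 as soon as an element is divisible by at least two of 2,3,5.
import Mathlib
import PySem

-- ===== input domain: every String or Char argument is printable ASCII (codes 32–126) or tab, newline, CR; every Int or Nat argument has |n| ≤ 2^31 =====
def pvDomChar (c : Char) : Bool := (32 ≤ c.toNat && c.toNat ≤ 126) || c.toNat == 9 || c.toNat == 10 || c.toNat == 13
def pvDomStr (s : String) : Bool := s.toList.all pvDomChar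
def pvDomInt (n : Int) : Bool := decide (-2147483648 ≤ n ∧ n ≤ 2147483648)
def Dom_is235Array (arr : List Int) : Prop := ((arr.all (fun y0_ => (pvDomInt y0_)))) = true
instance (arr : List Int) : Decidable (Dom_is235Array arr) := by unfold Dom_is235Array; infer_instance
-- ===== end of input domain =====

-- B replaces A's four running counters and final comparison with len(arr) by a single
-- early-exit scan returning 0 as soon as an element is divisible by ≥ 2 of {2,3,5} (simpler).

-- ===== PORT A =====
-- loop body of A: update the four counters for one element i
def stepA (c : Int × Int × Int × Int) (i : Int) : Int × Int × Int × Int :=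
  ( c.1 + (if PySem.Int.mod i 2 = 0 then 1 else 0),
    c.2.1 + (if PySem.Int.mod i 3 = 0 then 1 else 0),
    c.2.2.1 + (if PySem.Int.mod i 5 = 0 then 1 else 0),
    c.2.2.2 + (if PySem.Int.mod i 2 ≠ 0 ∧ PySem.Int.mod i 3 ≠ 0 ∧ PySem.Int.mod i 5 ≠ 0 then 1 else 0) )

def is235Array (arr : List Int) : Int :=
  let s := arr.foldl stepA (0, 0, 0, 0)
  if s.1 + s.2.1 + s.2.2.1 + s.2.2.2 = (arr.length : Int) then 1 else 0

-- ===== PORT B =====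
-- sum(i % d == 0 for d in (2, 3, 5))
def altCnt (i : Int) : Int :=
  (if PySem.Int.mod i 2 = 0 then 1 else 0) +
  (if PySem.Int.mod i 3 = 0 then 1 else 0) +
  (if PySem.Int.mod i 5 = 0 then 1 else 0)

def is235Array_alt : List Int → Int
  | [] => 1
  | i :: rest => if 2 ≤ altCnt i then 0 else is235Array_alt rest

-- ===== PRECONDITION & SPEC =====
def Spec_is235Array (arr : List Int) (out : Int) : Prop := out = is235Array_alt arr
instance (arr : List Int) (out : Int) : Decidable (Spec_is235Array arr out) := by unfold Spec_is235Array; infer_instance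

-- ===== CLAIM (what is proved, stated in full; the proofs are below) =====
def Claim_equal_is235Array : Prop := ∀ (arr : List Int), Dom_is235Array arr → Spec_is235Array arr (is235Array arr)

-- ===== LEMMAS AND PROOFS =====

-- per-element contribution of A's four counters
def wA (i : Int) : Int :=
  (if PySem.Int.mod i 2 = 0 then 1 else 0) +
  (if PySem.Int.mod i 3 = 0 then 1 else 0) +
  (if PySem.Int.mod i 5 = 0 then 1 else 0) +
  (if PySem.Int.mod i 2 ≠ 0 ∧ PySem.Int.mod i 3 ≠ 0 ∧ PySem.Int.mod i 5 ≠ 0 then 1 else 0)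

lemma foldl_sum (arr : List Int) (c : Int × Int × Int × Int) :
    (arr.foldl stepA c).1 + (arr.foldl stepA c).2.1 + (arr.foldl stepA c).2.2.1 +
      (arr.foldl stepA c).2.2.2
    = c.1 + c.2.1 + c.2.2.1 + c.2.2.2 + (arr.map wA).sum := by
  induction arr generalizing c with
  | nil => simp
  | cons i rest ih =>
      simp only [List.foldl_cons, List.map_cons, List.sum_cons]
      rw [ih]
      unfold stepA wA
      ring

lemma wA_ge_one (i : Int) : 1 ≤ wA i := by
  unfold wA
  by_cases h2 : PySem.Int.mod i 2 = 0 <;> by_cases h3 : PySem.Int.mod i 3 = 0 <;>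
    by_cases h5 : PySem.Int.mod i 5 = 0 <;>
    simp only [ne_eq, h2, h3, h5, not_true, not_false_iff, if_true, if_false,
      and_true, and_false] <;> norm_num

lemma wA_eq_one_iff (i : Int) : wA i = 1 ↔ altCnt i < 2 := by
  unfold wA altCnt
  by_cases h2 : PySem.Int.mod i 2 = 0 <;> by_cases h3 : PySem.Int.mod i 3 = 0 <;>
    by_cases h5 : PySem.Int.mod i 5 = 0 <;>
    simp only [ne_eq, h2, h3, h5, not_true, not_false_iff, if_true, if_false,
      and_true, and_false] <;> norm_num

lemma sum_ge_len (arr : List Int) : (arr.length : Int) ≤ (arr.map wA).sum := by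
  induction arr with
  | nil => simp
  | cons i rest ih =>
      simp only [List.map_cons, List.sum_cons, List.length_cons]
      have := wA_ge_one i
      push_cast
      omega

lemma sum_eq_len_iff (arr : List Int) :
    (arr.map wA).sum = (arr.length : Int) ↔ ∀ i ∈ arr, altCnt i < 2 := by
  induction arr with
  | nil => simp
  | cons i rest ih =>
      simp only [List.map_cons, List.sum_cons, List.length_cons, List.mem_cons]
      constructor
      · intro h
        have h1 := wA_ge_one i
        have h2 := sum_ge_len rest
        have hwi : wA i = 1 := by push_cast at h; omega
        have hrest : (rest.map wA).sum = (rest.length : Int) := by push_cast at h ⊢; omega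
        intro j hj
        rcases hj with rfl | hj
        · exact (wA_eq_one_iff j).mp hwi
        · exact (ih.mp hrest) j hj
      · intro h
        have hwi : wA i = 1 := (wA_eq_one_iff i).mpr (h i (Or.inl rfl))
        have hrest : (rest.map wA).sum = (rest.length : Int) :=
          ih.mpr (fun j hj => h j (Or.inr hj))
        rw [hwi, hrest]; push_cast; ring

lemma alt_eq_if (arr : List Int) :
    is235Array_alt arr = if ∀ i ∈ arr, altCnt i < 2 then 1 else 0 := by
  induction arr with
  | nil => simp [is235Array_alt]
  | cons i rest ih =>
      show (if 2 ≤ altCnt i then 0 else is235Array_alt rest) = _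
      by_cases h : 2 ≤ altCnt i
      · rw [if_pos h, if_neg]
        intro hall
        have := hall i (List.mem_cons_self)
        omega
      · rw [if_neg h, ih]
        by_cases hr : ∀ j ∈ rest, altCnt j < 2
        · rw [if_pos hr, if_pos]
          intro j hj
          rcases List.mem_cons.mp hj with rfl | hj'
          · omega
          · exact hr j hj'
        · rw [if_neg hr, if_neg]
          intro hall
          exact hr fun j hj => hall j (List.mem_cons_of_mem _ hj)

-- ===== VERDICT (by name: the statement is the Claim_ definition above) =====
theorem is235Array_spec : Claim_equal_is235Array := by
  intro arr _
  unfold Spec_is235Array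
  show (if (arr.foldl stepA (0, 0, 0, 0)).1 + (arr.foldl stepA (0, 0, 0, 0)).2.1 +
      (arr.foldl stepA (0, 0, 0, 0)).2.2.1 + (arr.foldl stepA (0, 0, 0, 0)).2.2.2
      = (arr.length : Int) then 1 else 0) = is235Array_alt arr
  have h := foldl_sum arr (0, 0, 0, 0)
  norm_num at h
  rw [h, alt_eq_if]
  by_cases hc : (arr.map wA).sum = (arr.length : Int)
  · rw [if_pos hc, if_pos ((sum_eq_len_iff arr).mp hc)]
  · rw [if_neg hc, if_neg (fun hall => hc ((sum_eq_len_iff arr).mpr hall))]
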